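-- pv_equiv track=rewrite | github.com/ghazalbn/Competitive-Programming | Assignments/A08/4.py | count_teleport_pipes
-- ===== SOURCE A (Python) =====
-- def dfs(node, graph, visited):
--     visited.add(node)
--     for neighbor in graph[node]:
--         if neighbor not in visited:
--             dfs(neighbor, graph, visited)
--
-- def count_teleport_pipes(n, m, graph):
--     max_removed_edges = 0
--
--     for node in range(1, n+1):
--         i = 0
--         while i < len(graph[node]):
--             neighbor = graph[node][i]
--             graph[node].remove(neighbor)
--             # if bfs(node, graph, neighbor):
--             visited = set()
--             dfs(node, graph, visited)
--             if neighbor in visited: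
--                 max_removed_edges += 1
--             else:
--                 graph[node].insert(i, neighbor)
--                 i += 1
--
--     min_pipes = m - max_removed_edges
--     return min_pipes
-- ===== SOURCE B (Python) =====
-- # B: different decomposition -- per node the adjacency list is split into a kept
-- # prefix and an unprocessed suffix and rebuilt (graph[node] = kept + rest[j+1:])
-- # instead of A's in-place remove/insert with a while-index; reachability uses an
-- # iterative explicit-stack search with early exit instead of A's recursive DFS.
-- # Return-value equivalence only: both mutate graph, but with duplicate edges the
-- # final order inside graph[node] can differ from A's (A removes the FIRST equal
-- # occurrence).
-- def _reachable(graph, start, target):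
--     visited = {start}
--     stack = [start]
--     while stack:
--         u = stack.pop()
--         for v in graph[u]:
--             if v == target:
--                 return True
--             if v not in visited:
--                 visited.add(v)
--                 stack.append(v)
--     return target in visited
--
-- def count_teleport_pipes(n, m, graph):
--     removed = 0
--     for node in range(1, n + 1):
--         rest = graph[node]
--         kept = []
--         for j in range(len(rest)):
--             v = rest[j]
--             graph[node] = kept + rest[j + 1:]
--             if _reachable(graph, node, v):
--                 removed += 1
--             else:
--                 kept.append(v)
--         graph[node] = kept
--     return m - removed
-- ===== Notes on version B (the rewrite author's own statement) =====
-- stated objective: alternative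
-- what changed: Per node the adjacency list is split into a kept prefix and an unprocessed suffix and graph[node] is rebuilt as kept + rest[j+1:] each step (no in-place remove/insert, no while-index), and the recursive full DFS is replaced by an iterative explicit-stack search with early exit on the target; return value only -- with duplicate edges the final in-place order of graph[node] can differ.
import Mathlib
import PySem

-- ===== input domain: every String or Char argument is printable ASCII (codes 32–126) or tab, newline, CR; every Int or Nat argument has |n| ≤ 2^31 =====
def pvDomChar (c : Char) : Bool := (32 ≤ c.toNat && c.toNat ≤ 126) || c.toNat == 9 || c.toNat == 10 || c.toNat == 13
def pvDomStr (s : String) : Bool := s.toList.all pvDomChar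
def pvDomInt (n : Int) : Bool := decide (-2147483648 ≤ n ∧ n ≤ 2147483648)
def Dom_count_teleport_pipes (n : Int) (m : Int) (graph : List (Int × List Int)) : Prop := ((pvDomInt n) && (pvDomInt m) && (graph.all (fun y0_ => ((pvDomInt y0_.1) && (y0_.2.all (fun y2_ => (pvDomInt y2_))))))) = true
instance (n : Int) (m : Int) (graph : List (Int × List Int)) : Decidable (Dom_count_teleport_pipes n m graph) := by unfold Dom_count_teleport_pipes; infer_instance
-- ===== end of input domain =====

-- B restructures the per-node pass: the adjacency list is split into a kept prefix and an
-- unprocessed suffix and rebuilt as kept ++ suffix each step (no in-place remove/insert, no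
-- while-index), and reachability is an iterative explicit-stack search with early exit instead
-- of A's recursive full DFS. Both Pythons mutate the caller's graph; the theorems are about the
-- return value only (with duplicate edges the final order inside graph[node] can differ).

-- ===== PORT A =====
-- A's recursive dfs; the Nat fuel only makes the recursion total (with the fuel the
-- ports pass, it is never exhausted on inputs satisfying Pre_).
def dfsA (g : PySem.Dict Int (List Int)) : Nat → Int → PySem.Set Int → PySem.Set Int
  | 0, _, visited => visited
  | fuel+1, node, visited =>
      (g.getD node []).foldl
        (fun vis neighbor =>
          if PySem.Set.contains vis neighbor then vis
          else dfsA g fuel neighbor vis)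
        (PySem.Set.add visited node)

-- A's inner 'while i < len(graph[node])' loop; fuel = len(graph[node]) at entry,
-- which is exactly the number of iterations (each iteration either removes one
-- element keeping i, or restores the list and increments i).
def edgeLoopA : Nat → Int → PySem.Dict Int (List Int) → Nat → Int → PySem.Dict Int (List Int) × Int
  | 0, _, g, _, removed => (g, removed)
  | fuel+1, node, g, i, removed =>
      let adj := g.getD node []
      if i < adj.length then
        let neighbor := adj.getD i 0
        let adj' := (PySem.List.remove? adj neighbor).getD []
        let g' := g.insert node adj'
        let visited := dfsA g' (g'.size + 1) node PySem.Set.empty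
        if PySem.Set.contains visited neighbor then
          edgeLoopA fuel node g' i (removed + 1)
        else
          edgeLoopA fuel node (g'.insert node (PySem.List.insert adj' (i : Int) neighbor)) (i + 1) removed
      else (g, removed)

def count_teleport_pipes (n : Int) (m : Int) (graph : List (Int × List Int)) : Int :=
  let st := (PySem.List.pyRange 1 (n+1) 1).foldl
    (fun (st : PySem.Dict Int (List Int) × Int) node =>
      edgeLoopA ((st.1.getD node []).length) node st.1 0 st.2)
    (PySem.Dict.mk graph, 0)
  m - st.2

-- ===== PORT B =====
-- the 'for v in graph[u]' body of B's _reachable; 'none' = the early 'return True'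
def innerB (target : Int) : List Int → List Int → PySem.Set Int → Option (List Int × PySem.Set Int)
  | [], stack, visited => some (stack, visited)
  | v :: vs, stack, visited =>
      if v = target then none
      else if PySem.Set.contains visited v then innerB target vs stack visited
      else innerB target vs (v :: stack) (PySem.Set.add visited v)

-- B's 'while stack' loop; the stack's head is its top (Python's list.pop() end).
-- Fuel only makes the loop total; with g.size+1 it is never exhausted under Pre_.
def reachLoopB (g : PySem.Dict Int (List Int)) (target : Int) : Nat → List Int → PySem.Set Int → Bool
  | 0, _, visited => PySem.Set.contains visited target
  | fuel+1, stack, visited =>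
      match stack with
      | [] => PySem.Set.contains visited target
      | u :: rest =>
          match innerB target (g.getD u []) rest visited with
          | none => true
          | some (stack', visited') => reachLoopB g target fuel stack' visited'

def reachableB (g : PySem.Dict Int (List Int)) (start target : Int) : Bool :=
  reachLoopB g target (g.size + 1) [start] (PySem.Set.add PySem.Set.empty start)

-- B's 'for j in range(len(rest))' pass: structural recursion on the unprocessed
-- suffix (v = rest[j] is its head, rest[j+1:] its tail), accumulating 'kept';
-- 'graph[node] = kept + rest[j+1:]' is the insert, and 'graph[node] = kept' at the end.
def edgeFoldB (node : Int) : List Int → List Int → PySem.Dict Int (List Int) → Int → PySem.Dict Int (List Int) × Int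
  | [], kept, g, removed => (g.insert node kept, removed)
  | v :: tail, kept, g, removed =>
      let g' := g.insert node (kept ++ tail)
      if reachableB g' node v then
        edgeFoldB node tail kept g' (removed + 1)
      else
        edgeFoldB node tail (kept ++ [v]) g' removed

def count_teleport_pipes_alt (n : Int) (m : Int) (graph : List (Int × List Int)) : Int :=
  let st := (PySem.List.pyRange 1 (n+1) 1).foldl
    (fun (st : PySem.Dict Int (List Int) × Int) node =>
      edgeFoldB node (st.1.getD node []) [] st.1 st.2)
    (PySem.Dict.mk graph, 0)
  m - st.2

-- ===== PRECONDITION & SPEC =====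
-- saturation of the set of nodes reachable from {1..n} in the (static) graph:
-- one pass adds every member's adjacency list; graph.length+1 passes reach the fixpoint
def satStep (graph : List (Int × List Int)) (s : PySem.Set Int) : PySem.Set Int :=
  s.foldl (fun acc u => PySem.Set.update acc ((PySem.Dict.mk graph).getD u [])) s
def satIter (graph : List (Int × List Int)) : Nat → PySem.Set Int → PySem.Set Int
  | 0, s => s
  | k+1, s => satIter graph k (satStep graph s)
def startSet (n : Int) (graph : List (Int × List Int)) : PySem.Set Int :=
  PySem.Set.ofList (PySem.List.pyRange 1 (min (n+1) ((graph.length : Int)+1)) 1)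
def reachAll (n : Int) (graph : List (Int × List Int)) : PySem.Set Int :=
  satIter graph (graph.length + 1) (startSet n graph)

-- Pre_ excludes (a) the inputs on which A raises KeyError: some node of 1..n, or some node
-- reachable from 1..n, has no entry (n ≤ graph.length is implied by that for distinct keys,
-- and bounding startSet by it keeps Pre_ quickly decidable for huge n); and (b) duplicate-key
-- association lists, which do not represent a Python dict input.
def Pre_count_teleport_pipes (n : Int) (m : Int) (graph : List (Int × List Int)) : Prop :=
  (graph.map Prod.fst).Nodup ∧
  n ≤ (graph.length : Int) ∧
  (∀ w ∈ reachAll n graph, w ∈ graph.map Prod.fst)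
instance (n : Int) (m : Int) (graph : List (Int × List Int)) : Decidable (Pre_count_teleport_pipes n m graph) := by unfold Pre_count_teleport_pipes; infer_instance

def pvWitness_count_teleport_pipes : Int × Int × (List (Int × List Int)) :=
  (2, 3, [(1, [2, 2]), (2, [1])])

def Spec_count_teleport_pipes (n : Int) (m : Int) (graph : List (Int × List Int)) (out : Int) : Prop := out = count_teleport_pipes_alt n m graph
instance (n : Int) (m : Int) (graph : List (Int × List Int)) (out : Int) : Decidable (Spec_count_teleport_pipes n m graph out) := by unfold Spec_count_teleport_pipes; infer_instance

-- ===== CLAIM (what is proved, stated in full; the proofs are below) =====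
def Claim_equal_count_teleport_pipes : Prop := ∀ (n : Int) (m : Int) (graph : List (Int × List Int)), Dom_count_teleport_pipes n m graph → Pre_count_teleport_pipes n m graph → Spec_count_teleport_pipes n m graph (count_teleport_pipes n m graph)

-- ===== LEMMAS AND PROOFS =====

-- edge relation, reachability, and the fuel-counting measure
def RelG (g : PySem.Dict Int (List Int)) (u v : Int) : Prop := v ∈ g.getD u ([] : List Int)
def ReachG (g : PySem.Dict Int (List Int)) (u v : Int) : Prop := Relation.ReflTransGen (RelG g) u v
def fcnt (g : PySem.Dict Int (List Int)) (vis : PySem.Set Int) : Nat :=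
  (g.keys.filter (fun k => decide (k ∉ vis))).length

theorem setContains_iff (s : PySem.Set Int) (x : Int) : PySem.Set.contains s x = true ↔ x ∈ s := by
  simp [PySem.Set.contains]

-- any set containing start and closed under the edge relation contains everything reachable
theorem reach_of_closed (g : PySem.Dict Int (List Int)) (S : List Int) (start target : Int)
    (hstart : start ∈ S) (hcl : ∀ u ∈ S, ∀ v, RelG g u v → v ∈ S)
    (hr : ReachG g start target) : target ∈ S := by
  induction hr with
  | refl => exact hstart
  | tail h1 h2 ih => exact hcl _ ih _ h2

theorem fcnt_mono (g : PySem.Dict Int (List Int)) {s t : PySem.Set Int}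
    (h : ∀ x, x ∈ s → x ∈ t) : fcnt g t ≤ fcnt g s := by
  unfold fcnt
  apply List.Sublist.length_le
  apply List.monotone_filter_right
  intro a
  by_cases hs : a ∈ s
  · have := h a hs
    simp [hs, this]
  · by_cases ht : a ∈ t <;> simp [hs, ht]

theorem fcnt_add_lt (g : PySem.Dict Int (List Int)) {vis : PySem.Set Int} {node : Int}
    (hk : node ∈ g.keys) (hn : node ∉ vis) :
    fcnt g (PySem.Set.add vis node) < fcnt g vis := by
  unfold fcnt
  have hsub : List.Sublist (g.keys.filter (fun k => decide (k ∉ PySem.Set.add vis node)))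
      (g.keys.filter (fun k => decide (k ∉ vis))) := by
    apply List.monotone_filter_right
    intro a
    by_cases h1 : a ∈ PySem.Set.add vis node
    · simp [h1]
    · have h2 : a ∉ vis := fun hv => h1 ((PySem.Set.mem_add vis node a).mpr (Or.inl hv))
      simp [h1, h2]
  cases Nat.eq_or_lt_of_le hsub.length_le with
  | inr h => exact h
  | inl h =>
    exfalso
    have heq := hsub.eq_of_length h
    have h1 : node ∈ g.keys.filter (fun k => decide (k ∉ vis)) := by
      simp [List.mem_filter, hk, hn]
    rw [← heq] at h1
    simp [List.mem_filter] at h1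

theorem fcnt_le_size (g : PySem.Dict Int (List Int)) (vis : PySem.Set Int) : fcnt g vis ≤ g.size := by
  have h1 : fcnt g vis ≤ g.keys.length := List.length_filter_le _ _
  have h2 : g.size = g.keys.length := by simp [PySem.Dict.size, PySem.Dict.keys]
  omega

theorem fcnt_pos (g : PySem.Dict Int (List Int)) {vis : PySem.Set Int} {x : Int}
    (hk : x ∈ g.keys) (hv : x ∉ vis) : 1 ≤ fcnt g vis := by
  unfold fcnt
  have hmem : x ∈ g.keys.filter (fun k => decide (k ∉ vis)) := by
    simp [List.mem_filter, hk, hv]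
  exact List.length_pos_of_mem hmem

-- ---- A side: the recursive dfs visits exactly the reachable set ----

theorem dfsA_foldl_grow (g : PySem.Dict Int (List Int)) (f : Nat)
    (ih : ∀ (node : Int) (vis : PySem.Set Int) (x : Int), x ∈ vis → x ∈ dfsA g f node vis) :
    ∀ (l : List Int) (acc : PySem.Set Int) (x : Int), x ∈ acc →
      x ∈ l.foldl (fun vis neighbor => if PySem.Set.contains vis neighbor then vis else dfsA g f neighbor vis) acc := by
  intro l
  induction l with
  | nil => intro acc x hx; simpa using hx
  | cons v vs ihl =>
    intro acc x hx
    simp only [List.foldl_cons]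
    by_cases hm : v ∈ acc
    · rw [if_pos ((setContains_iff acc v).mpr hm)]
      exact ihl acc x hx
    · rw [if_neg (fun hcc => hm ((setContains_iff acc v).mp hcc))]
      exact ihl _ x (ih v acc x hx)

theorem dfsA_grow (g : PySem.Dict Int (List Int)) :
    ∀ (f : Nat) (node : Int) (vis : PySem.Set Int) (x : Int), x ∈ vis → x ∈ dfsA g f node vis := by
  intro f
  induction f with
  | zero => intro node vis x hx; simpa [dfsA] using hx
  | succ f ih =>
    intro node vis x hx
    simp only [dfsA]
    exact dfsA_foldl_grow g f ih _ _ x ((PySem.Set.mem_add vis node x).mpr (Or.inl hx))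

theorem dfsA_self (g : PySem.Dict Int (List Int)) (f : Nat) (node : Int) (vis : PySem.Set Int) :
    node ∈ dfsA g (f+1) node vis := by
  simp only [dfsA]
  exact dfsA_foldl_grow g f (fun n v x hx => dfsA_grow g f n v x hx) _ _ node
    ((PySem.Set.mem_add vis node node).mpr (Or.inr rfl))

theorem dfsA_sound (g : PySem.Dict Int (List Int)) :
    ∀ (f : Nat) (node : Int) (vis : PySem.Set Int) (x : Int),
    x ∈ dfsA g f node vis → x ∈ vis ∨ ReachG g node x := by
  intro f
  induction f with
  | zero => intro node vis x hx; exact Or.inl (by simpa [dfsA] using hx)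
  | succ f ih =>
    intro node vis x hx
    simp only [dfsA] at hx
    have haux : ∀ (l : List Int), (∀ nb ∈ l, RelG g node nb) →
        ∀ (acc : PySem.Set Int), (∀ y ∈ acc, y ∈ vis ∨ ReachG g node y) →
        ∀ y ∈ l.foldl (fun vis neighbor => if PySem.Set.contains vis neighbor then vis else dfsA g f neighbor vis) acc,
        y ∈ vis ∨ ReachG g node y := by
      intro l
      induction l with
      | nil => intro _ acc hacc y hy; exact hacc y (by simpa using hy)
      | cons v vs ihl =>
        intro hrel acc hacc y hy
        simp only [List.foldl_cons] at hy
        by_cases hm : v ∈ acc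
        · rw [if_pos ((setContains_iff acc v).mpr hm)] at hy
          exact ihl (fun nb h => hrel nb (by simp [h])) acc hacc y hy
        · rw [if_neg (fun hcc => hm ((setContains_iff acc v).mp hcc))] at hy
          refine ihl (fun nb h => hrel nb (by simp [h])) _ ?_ y hy
          intro z hz
          rcases ih v acc z hz with h1 | h2
          · exact hacc z h1
          · exact Or.inr (Relation.ReflTransGen.head (hrel v (by simp)) h2)
    refine haux _ (fun nb h => h) _ ?_ x hx
    intro y hy
    rcases (PySem.Set.mem_add vis node y).mp hy with h | h
    · exact Or.inl h
    · subst h; exact Or.inr Relation.ReflTransGen.refl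

theorem dfsA_closed (g : PySem.Dict Int (List Int)) (W : List Int)
    (hWk : ∀ w ∈ W, w ∈ g.keys) (hWc : ∀ u ∈ W, ∀ v, RelG g u v → v ∈ W) :
    ∀ (f : Nat) (node : Int) (vis : PySem.Set Int),
    node ∈ W → node ∉ vis → fcnt g vis ≤ f →
    ∀ x ∈ dfsA g f node vis, x ∉ vis → ∀ v, RelG g x v → v ∈ dfsA g f node vis := by
  intro f
  induction f with
  | zero =>
    intro node vis hkW hnv hf
    exact absurd hf (by have := fcnt_pos g (hWk node hkW) hnv; omega)
  | succ f ihf =>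
    intro node vis hkW hnv hf
    simp only [dfsA]
    have haux : ∀ (l : List Int), (∀ nb ∈ l, RelG g node nb) →
        ∀ (acc : PySem.Set Int),
        fcnt g acc ≤ f →
        (∀ y ∈ acc, y ∉ PySem.Set.add vis node → ∀ v, RelG g y v → v ∈ acc) →
        (∀ y ∈ acc, y ∈ l.foldl (fun vis neighbor => if PySem.Set.contains vis neighbor then vis else dfsA g f neighbor vis) acc) ∧
        fcnt g (l.foldl (fun vis neighbor => if PySem.Set.contains vis neighbor then vis else dfsA g f neighbor vis) acc) ≤ f ∧
        (∀ nb ∈ l, nb ∈ l.foldl (fun vis neighbor => if PySem.Set.contains vis neighbor then vis else dfsA g f neighbor vis) acc) ∧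
        (∀ y ∈ l.foldl (fun vis neighbor => if PySem.Set.contains vis neighbor then vis else dfsA g f neighbor vis) acc,
          y ∉ PySem.Set.add vis node → ∀ v, RelG g y v →
          v ∈ l.foldl (fun vis neighbor => if PySem.Set.contains vis neighbor then vis else dfsA g f neighbor vis) acc) := by
      intro l
      induction l with
      | nil =>
        intro _ acc hcnt hexp
        exact ⟨fun y hy => hy, hcnt, by simp, hexp⟩
      | cons v vs ihl =>
        intro hrel acc hcnt hexp
        simp only [List.foldl_cons]
        by_cases hmv : v ∈ acc
        · rw [if_pos ((setContains_iff acc v).mpr hmv)]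
          obtain ⟨m1, c1, a1, e1⟩ := ihl (fun nb h => hrel nb (by simp [h])) acc hcnt hexp
          refine ⟨m1, c1, ?_, e1⟩
          intro nb hnb
          rcases List.mem_cons.mp hnb with h | h
          · subst h; exact m1 nb hmv
          · exact a1 nb h
        · rw [if_neg (fun hcc => hmv ((setContains_iff acc v).mp hcc))]
          have hvW : v ∈ W := hWc node hkW v (hrel v (by simp))
          have hvk : v ∈ g.keys := hWk v hvW
          have hf1 : 1 ≤ f := le_trans (fcnt_pos g hvk hmv) hcnt
          have hvin : v ∈ dfsA g f v acc := by
            obtain ⟨f', hf'⟩ : ∃ f', f = f' + 1 := ⟨f - 1, by omega⟩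
            rw [hf']; exact dfsA_self g f' v acc
          have hmono : ∀ y ∈ acc, y ∈ dfsA g f v acc := fun y hy => dfsA_grow g f v acc y hy
          have hcnt' : fcnt g (dfsA g f v acc) ≤ f := le_trans (fcnt_mono g hmono) hcnt
          have hexp' : ∀ y ∈ dfsA g f v acc, y ∉ PySem.Set.add vis node →
              ∀ w, RelG g y w → w ∈ dfsA g f v acc := by
            intro y hy hyn w hrw
            by_cases hyacc : y ∈ acc
            · exact hmono w (hexp y hyacc hyn w hrw)
            · exact ihf v acc hvW hmv hcnt y hy hyacc w hrw
          obtain ⟨m1, c1, a1, e1⟩ := ihl (fun nb h => hrel nb (by simp [h])) (dfsA g f v acc) hcnt' hexp'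
          refine ⟨fun y hy => m1 y (hmono y hy), c1, ?_, e1⟩
          intro nb hnb
          rcases List.mem_cons.mp hnb with h | h
          · subst h; exact m1 nb hvin
          · exact a1 nb h
    have hcnt0 : fcnt g (PySem.Set.add vis node) ≤ f := by
      have := fcnt_add_lt g (hWk node hkW) hnv
      omega
    have hexp0 : ∀ y ∈ PySem.Set.add vis node, y ∉ PySem.Set.add vis node →
        ∀ v, RelG g y v → v ∈ PySem.Set.add vis node := fun y hy hyn => absurd hy hyn
    obtain ⟨hmono, hcnt1, hall, hexp1⟩ :=
      haux (g.getD node []) (fun nb h => h) (PySem.Set.add vis node) hcnt0 hexp0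
    intro x hx hxvis v hrel
    by_cases hxn : x = node
    · subst hxn; exact hall v hrel
    · refine hexp1 x hx (fun hmem => ?_) v hrel
      rcases (PySem.Set.mem_add vis node x).mp hmem with h | h
      · exact hxvis h
      · exact hxn h

theorem dfsA_iff (g : PySem.Dict Int (List Int)) (W : List Int)
    (hWk : ∀ w ∈ W, w ∈ g.keys) (hWc : ∀ u ∈ W, ∀ v, RelG g u v → v ∈ W) (node : Int)
    (hkW : node ∈ W) (x : Int) :
    x ∈ dfsA g (g.size + 1) node PySem.Set.empty ↔ ReachG g node x := by
  constructor
  · intro hx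
    rcases dfsA_sound g _ node _ x hx with h | h
    · exact absurd h (by simp [PySem.Set.empty])
    · exact h
  · refine reach_of_closed g _ node x (dfsA_self g _ node _) ?_
    intro u hu v hrv
    exact dfsA_closed g W hWk hWc (g.size + 1) node PySem.Set.empty hkW (by simp [PySem.Set.empty])
      (by have := fcnt_le_size g PySem.Set.empty; omega) u hu (by simp [PySem.Set.empty]) v hrv

-- ---- B side: the iterative stack search decides the same reachability ----

theorem innerB_none (target : Int) : ∀ (l stack : List Int) (vis : PySem.Set Int),
    innerB target l stack vis = none → target ∈ l := by
  intro l
  induction l with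
  | nil => intro st vis h; simp [innerB] at h
  | cons v vs ihl =>
    intro st vis h
    simp only [innerB] at h
    by_cases hvt : v = target
    · subst hvt; simp
    · rw [if_neg hvt] at h
      by_cases hm : v ∈ vis
      · rw [if_pos ((setContains_iff vis v).mpr hm)] at h
        exact List.mem_cons_of_mem _ (ihl _ _ h)
      · rw [if_neg (fun hcc => hm ((setContains_iff vis v).mp hcc))] at h
        exact List.mem_cons_of_mem _ (ihl _ _ h)

theorem innerB_S1 (target : Int) : ∀ (l stack : List Int) (vis : PySem.Set Int)
    (stack' : List Int) (vis' : PySem.Set Int),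
    innerB target l stack vis = some (stack', vis') → ∀ x ∈ vis, x ∈ vis' := by
  intro l
  induction l with
  | nil =>
    intro st vis st' vis' h x hx
    simp only [innerB, Option.some.injEq, Prod.mk.injEq] at h
    exact h.2 ▸ hx
  | cons v vs ihl =>
    intro st vis st' vis' h x hx
    simp only [innerB] at h
    by_cases hvt : v = target
    · rw [if_pos hvt] at h; exact absurd h (by simp)
    · rw [if_neg hvt] at h
      by_cases hm : v ∈ vis
      · rw [if_pos ((setContains_iff vis v).mpr hm)] at h
        exact ihl _ _ _ _ h x hx
      · rw [if_neg (fun hcc => hm ((setContains_iff vis v).mp hcc))] at h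
        exact ihl _ _ _ _ h x ((PySem.Set.mem_add vis v x).mpr (Or.inl hx))

theorem innerB_S7 (target : Int) : ∀ (l stack : List Int) (vis : PySem.Set Int)
    (stack' : List Int) (vis' : PySem.Set Int),
    innerB target l stack vis = some (stack', vis') → ∀ x ∈ stack, x ∈ stack' := by
  intro l
  induction l with
  | nil =>
    intro st vis st' vis' h x hx
    simp only [innerB, Option.some.injEq, Prod.mk.injEq] at h
    exact h.1 ▸ hx
  | cons v vs ihl =>
    intro st vis st' vis' h x hx
    simp only [innerB] at h
    by_cases hvt : v = target
    · rw [if_pos hvt] at h; exact absurd h (by simp)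
    · rw [if_neg hvt] at h
      by_cases hm : v ∈ vis
      · rw [if_pos ((setContains_iff vis v).mpr hm)] at h
        exact ihl _ _ _ _ h x hx
      · rw [if_neg (fun hcc => hm ((setContains_iff vis v).mp hcc))] at h
        exact ihl _ _ _ _ h x (List.mem_cons_of_mem v hx)

theorem innerB_S3 (target : Int) : ∀ (l stack : List Int) (vis : PySem.Set Int)
    (stack' : List Int) (vis' : PySem.Set Int),
    innerB target l stack vis = some (stack', vis') →
    ∀ x ∈ vis', x ∈ vis ∨ (x ∈ l ∧ x ∈ stack') := by
  intro l
  induction l with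
  | nil =>
    intro st vis st' vis' h x hx
    simp only [innerB, Option.some.injEq, Prod.mk.injEq] at h
    exact Or.inl (h.2 ▸ hx)
  | cons v vs ihl =>
    intro st vis st' vis' h x hx
    simp only [innerB] at h
    by_cases hvt : v = target
    · rw [if_pos hvt] at h; exact absurd h (by simp)
    · rw [if_neg hvt] at h
      by_cases hm : v ∈ vis
      · rw [if_pos ((setContains_iff vis v).mpr hm)] at h
        rcases ihl _ _ _ _ h x hx with h1 | ⟨h1, h2⟩
        · exact Or.inl h1
        · exact Or.inr ⟨List.mem_cons_of_mem v h1, h2⟩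
      · rw [if_neg (fun hcc => hm ((setContains_iff vis v).mp hcc))] at h
        rcases ihl _ _ _ _ h x hx with h1 | ⟨h1, h2⟩
        · rcases (PySem.Set.mem_add vis v x).mp h1 with h2 | h2
          · exact Or.inl h2
          · subst h2
            exact Or.inr ⟨by simp, innerB_S7 target _ _ _ _ _ h x (by simp)⟩
        · exact Or.inr ⟨List.mem_cons_of_mem v h1, h2⟩

theorem innerB_S4 (target : Int) : ∀ (l stack : List Int) (vis : PySem.Set Int)
    (stack' : List Int) (vis' : PySem.Set Int),
    innerB target l stack vis = some (stack', vis') →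
    (∀ x ∈ stack, x ∈ vis) → ∀ x ∈ stack', x ∈ vis' := by
  intro l
  induction l with
  | nil =>
    intro st vis st' vis' h hsv x hx
    simp only [innerB, Option.some.injEq, Prod.mk.injEq] at h
    exact h.2 ▸ hsv x (h.1 ▸ hx)
  | cons v vs ihl =>
    intro st vis st' vis' h hsv x hx
    simp only [innerB] at h
    by_cases hvt : v = target
    · rw [if_pos hvt] at h; exact absurd h (by simp)
    · rw [if_neg hvt] at h
      by_cases hm : v ∈ vis
      · rw [if_pos ((setContains_iff vis v).mpr hm)] at h
        exact ihl _ _ _ _ h hsv x hx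
      · rw [if_neg (fun hcc => hm ((setContains_iff vis v).mp hcc))] at h
        refine ihl _ _ _ _ h ?_ x hx
        intro y hy
        rcases List.mem_cons.mp hy with h1 | h1
        · subst h1; exact (PySem.Set.mem_add vis y y).mpr (Or.inr rfl)
        · exact (PySem.Set.mem_add vis v y).mpr (Or.inl (hsv y h1))

theorem innerB_S5 (target : Int) : ∀ (l stack : List Int) (vis : PySem.Set Int)
    (stack' : List Int) (vis' : PySem.Set Int),
    innerB target l stack vis = some (stack', vis') →
    ∀ v ∈ l, v ≠ target ∧ v ∈ vis' := by
  intro l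
  induction l with
  | nil => intro st vis st' vis' _ v hv; simp at hv
  | cons v vs ihl =>
    intro st vis st' vis' h w hw
    simp only [innerB] at h
    by_cases hvt : v = target
    · rw [if_pos hvt] at h; exact absurd h (by simp)
    · rw [if_neg hvt] at h
      by_cases hm : v ∈ vis
      · rw [if_pos ((setContains_iff vis v).mpr hm)] at h
        rcases List.mem_cons.mp hw with h1 | h1
        · subst h1; exact ⟨hvt, innerB_S1 target _ _ _ _ _ h w hm⟩
        · exact ihl _ _ _ _ h w h1
      · rw [if_neg (fun hcc => hm ((setContains_iff vis v).mp hcc))] at h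
        rcases List.mem_cons.mp hw with h1 | h1
        · subst h1
          exact ⟨hvt, innerB_S1 target _ _ _ _ _ h w ((PySem.Set.mem_add vis w w).mpr (Or.inr rfl))⟩
        · exact ihl _ _ _ _ h w h1

theorem innerB_S6 (target : Int) : ∀ (l stack : List Int) (vis : PySem.Set Int)
    (stack' : List Int) (vis' : PySem.Set Int),
    innerB target l stack vis = some (stack', vis') →
    (∀ x ∈ stack, x ∈ vis) → stack.Nodup → stack'.Nodup := by
  intro l
  induction l with
  | nil =>
    intro st vis st' vis' h _ hnd
    simp only [innerB, Option.some.injEq, Prod.mk.injEq] at h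
    exact h.1 ▸ hnd
  | cons v vs ihl =>
    intro st vis st' vis' h hsv hnd
    simp only [innerB] at h
    by_cases hvt : v = target
    · rw [if_pos hvt] at h; exact absurd h (by simp)
    · rw [if_neg hvt] at h
      by_cases hm : v ∈ vis
      · rw [if_pos ((setContains_iff vis v).mpr hm)] at h
        exact ihl _ _ _ _ h hsv hnd
      · rw [if_neg (fun hcc => hm ((setContains_iff vis v).mp hcc))] at h
        refine ihl _ _ _ _ h ?_ ?_
        · intro y hy
          rcases List.mem_cons.mp hy with h1 | h1
          · subst h1; exact (PySem.Set.mem_add vis y y).mpr (Or.inr rfl)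
          · exact (PySem.Set.mem_add vis v y).mpr (Or.inl (hsv y h1))
        · exact List.nodup_cons.mpr ⟨fun hmem => hm (hsv v hmem), hnd⟩

theorem innerB_S8 (g : PySem.Dict Int (List Int)) (target : Int) :
    ∀ (l stack : List Int) (vis : PySem.Set Int) (stack' : List Int) (vis' : PySem.Set Int),
    (∀ v ∈ l, v ∈ g.keys) →
    innerB target l stack vis = some (stack', vis') →
    stack'.length + fcnt g vis' ≤ stack.length + fcnt g vis := by
  intro l
  induction l with
  | nil =>
    intro st vis st' vis' _ h
    simp only [innerB, Option.some.injEq, Prod.mk.injEq] at h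
    rw [← h.1, ← h.2]
  | cons v vs ihl =>
    intro st vis st' vis' hkeys h
    simp only [innerB] at h
    by_cases hvt : v = target
    · rw [if_pos hvt] at h; exact absurd h (by simp)
    · rw [if_neg hvt] at h
      by_cases hm : v ∈ vis
      · rw [if_pos ((setContains_iff vis v).mpr hm)] at h
        exact ihl _ _ _ _ (fun w hw => hkeys w (by simp [hw])) h
      · rw [if_neg (fun hcc => hm ((setContains_iff vis v).mp hcc))] at h
        have h1 := ihl _ _ _ _ (fun w hw => hkeys w (by simp [hw])) h
        have h2 := fcnt_add_lt g (hkeys v (by simp)) hm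
        simp only [List.length_cons] at h1
        omega

theorem reachLoopB_iff (g : PySem.Dict Int (List Int)) (W : List Int)
    (hWk : ∀ w ∈ W, w ∈ g.keys) (hWc : ∀ u ∈ W, ∀ v, RelG g u v → v ∈ W) (start target : Int) :
    ∀ (f : Nat) (stack : List Int) (vis : PySem.Set Int),
    (∀ x ∈ stack, x ∈ vis) → (∀ x ∈ vis, ReachG g start x) → (∀ x ∈ vis, x ∈ W) → stack.Nodup →
    (∀ u ∈ vis, u ∉ stack → ∀ v, RelG g u v → v ≠ target ∧ v ∈ vis) →
    start ∈ vis →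
    stack.length + fcnt g vis < f →
    (reachLoopB g target f stack vis = true ↔ ReachG g start target) := by
  intro f
  induction f with
  | zero => intro stack vis _ _ _ _ _ _ hf; omega
  | succ f ihf =>
    intro stack vis hJ1 hJ2 hJW hJ3 hJ4 hJ6 hf
    cases stack with
    | nil =>
      simp only [reachLoopB]
      rw [setContains_iff]
      constructor
      · exact fun h => hJ2 target h
      · exact reach_of_closed g vis start target hJ6
          (fun u hu v hrv => (hJ4 u hu (by simp) v hrv).2)
    | cons u rest =>
      simp only [reachLoopB]
      cases hinner : innerB target (g.getD u []) rest vis with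
      | none =>
        have ht : target ∈ g.getD u [] := innerB_none target _ _ _ hinner
        have hreach : ReachG g start target :=
          Relation.ReflTransGen.tail (hJ2 u (hJ1 u (by simp))) ht
        simp [hreach]
      | some p =>
        obtain ⟨st', vis'⟩ := p
        have huW : u ∈ W := hJW u (hJ1 u (by simp))
        apply ihf st' vis'
        · exact innerB_S4 target _ _ _ _ _ hinner (fun x hx => hJ1 x (List.mem_cons_of_mem u hx))
        · intro x hx
          rcases innerB_S3 target _ _ _ _ _ hinner x hx with h1 | ⟨h1, _⟩
          · exact hJ2 x h1
          · exact Relation.ReflTransGen.tail (hJ2 u (hJ1 u (by simp))) h1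
        · intro x hx
          rcases innerB_S3 target _ _ _ _ _ hinner x hx with h1 | ⟨h1, _⟩
          · exact hJW x h1
          · exact hWc u huW x h1
        · exact innerB_S6 target _ _ _ _ _ hinner
            (fun x hx => hJ1 x (List.mem_cons_of_mem u hx)) (List.nodup_cons.mp hJ3).2
        · intro u' hu' hnst' v hrv
          rcases innerB_S3 target _ _ _ _ _ hinner u' hu' with h1 | ⟨_, h2⟩
          · by_cases hu : u' = u
            · subst hu; exact innerB_S5 target _ _ _ _ _ hinner v hrv
            · have hnotrest : u' ∉ rest := fun hr => hnst' (innerB_S7 target _ _ _ _ _ hinner u' hr)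
              have h3 := hJ4 u' h1 (by simp [hu, hnotrest]) v hrv
              exact ⟨h3.1, innerB_S1 target _ _ _ _ _ hinner v h3.2⟩
          · exact absurd h2 hnst'
        · exact innerB_S1 target _ _ _ _ _ hinner start hJ6
        · have hcount := innerB_S8 g target _ _ _ _ _
            (fun v hv => hWk v (hWc u huW v hv)) hinner
          simp only [List.length_cons] at hf
          omega

theorem reachableB_iff (g : PySem.Dict Int (List Int)) (W : List Int)
    (hWk : ∀ w ∈ W, w ∈ g.keys) (hWc : ∀ u ∈ W, ∀ v, RelG g u v → v ∈ W) (start target : Int)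
    (hkW : start ∈ W) :
    (reachableB g start target = true) ↔ ReachG g start target := by
  unfold reachableB
  apply reachLoopB_iff g W hWk hWc start target (g.size + 1) [start] (PySem.Set.add PySem.Set.empty start)
  · intro x hx
    have hxs : x = start := by simpa using hx
    subst hxs
    exact (PySem.Set.mem_add PySem.Set.empty x x).mpr (Or.inr rfl)
  · intro x hx
    rcases (PySem.Set.mem_add PySem.Set.empty start x).mp hx with h | h
    · exact absurd h (by simp [PySem.Set.empty])
    · subst h; exact Relation.ReflTransGen.refl
  · intro x hx
    rcases (PySem.Set.mem_add PySem.Set.empty start x).mp hx with h | h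
    · exact absurd h (by simp [PySem.Set.empty])
    · subst h; exact hkW
  · simp
  · intro u hu hnst v hrv
    exfalso
    apply hnst
    rcases (PySem.Set.mem_add PySem.Set.empty start u).mp hu with h | h
    · exact absurd h (by simp [PySem.Set.empty])
    · simp [h]
  · exact (PySem.Set.mem_add PySem.Set.empty start start).mpr (Or.inr rfl)
  · have h1 := fcnt_add_lt g (vis := PySem.Set.empty) (hWk start hkW) (by simp [PySem.Set.empty])
    have h2 := fcnt_le_size g PySem.Set.empty
    simp only [List.length_singleton]
    omega

-- ---- reachability only depends on the membership view of the adjacency lists ----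

theorem reachG_congr (g1 g2 : PySem.Dict Int (List Int))
    (h : ∀ u v, RelG g1 u v ↔ RelG g2 u v) (s t : Int) :
    ReachG g1 s t ↔ ReachG g2 s t :=
  ⟨Relation.ReflTransGen.mono (fun a b => (h a b).mp),
   Relation.ReflTransGen.mono (fun a b => (h a b).mpr)⟩

-- A's test on gA' equals B's test on gB' when the two graphs have the same membership view
theorem test_eq (gA' gB' : PySem.Dict Int (List Int)) (W : List Int)
    (hkeys : gA'.keys = gB'.keys)
    (hWk : ∀ w ∈ W, w ∈ gA'.keys) (hWc : ∀ u ∈ W, ∀ v, RelG gA' u v → v ∈ W)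
    (hrel : ∀ u v, RelG gA' u v ↔ RelG gB' u v) (node target : Int) (hkW : node ∈ W) :
    PySem.Set.contains (dfsA gA' (gA'.size + 1) node PySem.Set.empty) target
      = reachableB gB' node target := by
  rw [Bool.eq_iff_iff, setContains_iff,
    reachableB_iff gB' W (fun w hw => hkeys ▸ hWk w hw)
      (fun u hu v hv => hWc u hu v ((hrel u v).mpr hv)) node target hkW,
    dfsA_iff gA' W hWk hWc node hkW target]
  exact reachG_congr gA' gB' hrel node target

-- ---- the saturation in Pre_ computes a closed superset of everything traversed ----

theorem nodup_subset_length {l1 l2 : List Int} (h1 : l1.Nodup) (hs : ∀ x ∈ l1, x ∈ l2) :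
    l1.length ≤ l2.length := by
  calc l1.length = l1.toFinset.card := (List.toFinset_card_of_nodup h1).symm
    _ ≤ l2.toFinset.card := Finset.card_le_card (fun a ha => by
        simp only [List.mem_toFinset] at ha ⊢; exact hs a ha)
    _ ≤ l2.length := List.toFinset_card_le l2

theorem nodup_ssubset_length {l1 l2 : List Int} (h1 : l1.Nodup) (h2 : l2.Nodup)
    (hs : ∀ x ∈ l1, x ∈ l2) {x : Int} (hx2 : x ∈ l2) (hx1 : x ∉ l1) :
    l1.length < l2.length := by
  have hss : l1.toFinset ⊂ l2.toFinset := by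
    constructor
    · intro a ha
      simp only [List.mem_toFinset] at ha ⊢
      exact hs a ha
    · intro hsubset
      exact hx1 (by simpa using hsubset (by simpa using hx2))
  calc l1.length = l1.toFinset.card := (List.toFinset_card_of_nodup h1).symm
    _ < l2.toFinset.card := Finset.card_lt_card hss
    _ = l2.length := List.toFinset_card_of_nodup h2

theorem mem_satStep (graph : List (Int × List Int)) (s : PySem.Set Int) (x : Int) :
    x ∈ satStep graph s ↔ x ∈ s ∨ ∃ u ∈ s, x ∈ (PySem.Dict.mk graph).getD u ([] : List Int) := by
  have haux : ∀ (l : List Int) (acc : PySem.Set Int),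
      x ∈ l.foldl (fun acc u => PySem.Set.update acc ((PySem.Dict.mk graph).getD u [])) acc ↔
      x ∈ acc ∨ ∃ u ∈ l, x ∈ (PySem.Dict.mk graph).getD u ([] : List Int) := by
    intro l
    induction l with
    | nil => intro acc; simp
    | cons u us ihl =>
      intro acc
      simp only [List.foldl_cons]
      rw [ihl, PySem.Set.mem_update]
      constructor
      · rintro ((h | h) | ⟨w, hw, hx⟩)
        · exact Or.inl h
        · exact Or.inr ⟨u, by simp, h⟩
        · exact Or.inr ⟨w, by simp [hw], hx⟩
      · rintro (h | ⟨w, hw, hx⟩)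
        · exact Or.inl (Or.inl h)
        · rcases List.mem_cons.mp hw with h1 | h1
          · subst h1; exact Or.inl (Or.inr hx)
          · exact Or.inr ⟨w, h1, hx⟩
  exact haux s s

theorem satStep_nodup (graph : List (Int × List Int)) (s : PySem.Set Int) (h : s.Nodup) :
    (satStep graph s).Nodup := by
  have haux : ∀ (l : List Int) (acc : PySem.Set Int), acc.Nodup →
      (l.foldl (fun acc u => PySem.Set.update acc ((PySem.Dict.mk graph).getD u [])) acc).Nodup := by
    intro l
    induction l with
    | nil => intro acc h; simpa using h
    | cons u us ihl =>
      intro acc h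
      simp only [List.foldl_cons]
      exact ihl _ (PySem.Set.nodup_update _ _ h)
  exact haux s s h

theorem satIter_succ' (graph : List (Int × List Int)) :
    ∀ (k : Nat) (s : PySem.Set Int), satIter graph (k+1) s = satStep graph (satIter graph k s) := by
  intro k
  induction k with
  | zero => intro s; rfl
  | succ k ih =>
    intro s
    calc satIter graph (k+1+1) s = satIter graph (k+1) (satStep graph s) := rfl
      _ = satStep graph (satIter graph k (satStep graph s)) := ih _
      _ = satStep graph (satIter graph (k+1) s) := rfl

theorem satIter_nodup (graph : List (Int × List Int)) :
    ∀ (k : Nat) (s : PySem.Set Int), s.Nodup → (satIter graph k s).Nodup := by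
  intro k
  induction k with
  | zero => intro s h; exact h
  | succ k ih => intro s h; exact ih _ (satStep_nodup graph s h)

theorem satIter_mono (graph : List (Int × List Int)) :
    ∀ (j k : Nat) (s : PySem.Set Int) (x : Int), j ≤ k →
    x ∈ satIter graph j s → x ∈ satIter graph k s := by
  intro j k
  induction k with
  | zero => intro s x hjk hx; exact (Nat.le_zero.mp hjk) ▸ hx
  | succ k ih =>
    intro s x hjk hx
    by_cases h : j = k + 1
    · subst h; exact hx
    · rw [satIter_succ']
      exact (mem_satStep graph _ x).mpr (Or.inl (ih s x (by omega) hx))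

theorem satIter_closed (graph : List (Int × List Int)) (s0 : PySem.Set Int)
    (hnds0 : s0.Nodup)
    (hsub : ∀ w ∈ satIter graph (graph.length + 1) s0, w ∈ graph.map Prod.fst) :
    ∀ u ∈ satIter graph (graph.length + 1) s0, ∀ v, v ∈ (PySem.Dict.mk graph).getD u ([] : List Int) →
    v ∈ satIter graph (graph.length + 1) s0 := by
  by_cases hfix : ∃ j, j ≤ graph.length ∧
      ∀ x ∈ satStep graph (satIter graph j s0), x ∈ satIter graph j s0
  · obtain ⟨j, hj, hstep⟩ := hfix
    have hstab : ∀ (d : Nat) (x : Int), x ∈ satIter graph (j+d) s0 ↔ x ∈ satIter graph j s0 := by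
      intro d
      induction d with
      | zero => intro x; rfl
      | succ d ih =>
        intro x
        rw [show j + (d+1) = (j+d)+1 by omega, satIter_succ']
        constructor
        · intro hx
          rcases (mem_satStep graph _ x).mp hx with h | ⟨u, hu, hxu⟩
          · exact (ih x).mp h
          · exact hstep x ((mem_satStep graph _ x).mpr (Or.inr ⟨u, (ih u).mp hu, hxu⟩))
        · intro hx
          exact (mem_satStep graph _ x).mpr (Or.inl ((ih x).mpr hx))
    intro u hu v hv
    have hj' : j + (graph.length + 1 - j) = graph.length + 1 := by omega
    have hu' : u ∈ satIter graph j s0 := by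
      refine (hstab (graph.length + 1 - j) u).mp ?_
      rw [hj']
      exact hu
    have hv' : v ∈ satIter graph j s0 :=
      hstep v ((mem_satStep graph _ v).mpr (Or.inr ⟨u, hu', hv⟩))
    rw [← hj']
    exact (hstab (graph.length + 1 - j) v).mpr hv'
  · exfalso
    push_neg at hfix
    have hgrow : ∀ j, j ≤ graph.length →
        (satIter graph j s0).length < (satIter graph (j+1) s0).length := by
      intro j hj
      obtain ⟨x, hx1, hx2⟩ := hfix j hj
      rw [satIter_succ']
      exact nodup_ssubset_length (satIter_nodup graph j s0 hnds0)
        (satStep_nodup graph _ (satIter_nodup graph j s0 hnds0))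
        (fun y hy => (mem_satStep graph _ y).mpr (Or.inl hy)) hx1 hx2
    have hlen : ∀ j, j ≤ graph.length + 1 → j ≤ (satIter graph j s0).length := by
      intro j
      induction j with
      | zero => intro _; omega
      | succ j ih =>
        intro hj
        have h1 := hgrow j (by omega)
        have h2 := ih (by omega)
        omega
    have h3 := hlen (graph.length + 1) (le_refl _)
    have h4 : (satIter graph (graph.length + 1) s0).length ≤ (graph.map Prod.fst).length :=
      nodup_subset_length (satIter_nodup graph _ s0 hnds0) hsub
    rw [List.length_map] at h4
    omega

-- inserting a sublist of node's adjacency (or a reordering of it) only shrinks the edge relation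
theorem relG_insert_sub (g : PySem.Dict Int (List Int)) (node : Int) (l : List Int)
    (hl : ∀ v ∈ l, v ∈ g.getD node ([] : List Int)) :
    ∀ u v, RelG (g.insert node l) u v → RelG g u v := by
  intro u v h
  unfold RelG at h ⊢
  rw [PySem.Dict.getD_insert] at h
  by_cases hu : u = node
  · rw [if_pos hu] at h; subst hu; exact hl v h
  · rw [if_neg hu] at h; exact h

-- positional helpers for the kept/rest decomposition
theorem getD_append_cons (p rest : List Int) (v : Int) :
    (p ++ v :: rest).getD p.length 0 = v := by
  simp [List.getD_eq_getElem?_getD]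

theorem erase_split (p rest : List Int) (v : Int) :
    (p ++ v :: rest).erase v = ((p ++ [v]).erase v) ++ rest := by
  by_cases hv : v ∈ p
  · rw [List.erase_append_left _ hv, List.erase_append_left _ hv]
    simp
  · rw [List.erase_append_right _ hv, List.erase_append_right _ hv,
      List.erase_cons_head, List.erase_cons_head]
    simp

theorem length_erase_snoc (p : List Int) (v : Int) : ((p ++ [v]).erase v).length = p.length := by
  have hm : v ∈ p ++ [v] := by simp
  rw [List.length_erase_of_mem hm]
  simp

theorem mem_erase_snoc (p : List Int) (v x : Int) : x ∈ (p ++ [v]).erase v ↔ x ∈ p := by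
  by_cases hv : v ∈ p
  · rw [List.erase_append_left _ hv]
    constructor
    · intro h
      rcases List.mem_append.mp h with h | h
      · exact List.mem_of_mem_erase h
      · simp at h; subst h; exact hv
    · intro h
      by_cases hxv : x = v
      · subst hxv; simp
      · exact List.mem_append.mpr (Or.inl (List.mem_erase_of_ne hxv |>.mpr h))
  · rw [List.erase_append_right _ hv, List.erase_cons_head]
    simp

-- ---- the core correspondence: A's indexed while-loop = B's kept/rest fold ----
theorem loop_corr (node : Int) (W : List Int) (hkW : node ∈ W) :
    ∀ (rest p kept : List Int) (gA gB : PySem.Dict Int (List Int)) (removed : Int),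
    gA.keys = gB.keys →
    (∀ w ∈ W, w ∈ gA.keys) →
    (∀ u ∈ W, ∀ v, RelG gA u v → v ∈ W) →
    (∀ k : Int, k ≠ node → ∀ x : Int, x ∈ gA.getD k ([] : List Int) ↔ x ∈ gB.getD k ([] : List Int)) →
    gA.getD node ([] : List Int) = p ++ rest →
    (∀ x : Int, x ∈ p ↔ x ∈ kept) →
    (edgeLoopA rest.length node gA p.length removed).2 = (edgeFoldB node rest kept gB removed).2 ∧
    (edgeLoopA rest.length node gA p.length removed).1.keys = gA.keys ∧
    (edgeFoldB node rest kept gB removed).1.keys = gB.keys ∧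
    (∀ k : Int, k ≠ node →
      (edgeLoopA rest.length node gA p.length removed).1.getD k ([] : List Int) = gA.getD k [] ∧
      (edgeFoldB node rest kept gB removed).1.getD k ([] : List Int) = gB.getD k []) ∧
    (∀ x : Int, x ∈ (edgeLoopA rest.length node gA p.length removed).1.getD node ([] : List Int) ↔
      x ∈ (edgeFoldB node rest kept gB removed).1.getD node ([] : List Int)) ∧
    (∀ x : Int, x ∈ (edgeLoopA rest.length node gA p.length removed).1.getD node ([] : List Int) →
      x ∈ gA.getD node ([] : List Int)) := by
  intro rest
  induction rest with
  | nil =>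
    intro p kept gA gB removed hkeys hWk _hWc hoff hnodeA hmem
    have hnodeKeyB : PySem.Dict.contains gB node = true :=
      (PySem.Dict.contains_iff_mem_keys gB node).mpr (hkeys ▸ hWk node hkW)
    refine ⟨rfl, rfl, PySem.Dict.keys_insert_of_contains gB kept hnodeKeyB, ?_, ?_, fun x hx => hx⟩
    · intro k hk
      refine ⟨rfl, ?_⟩
      show (gB.insert node kept).getD k ([] : List Int) = gB.getD k []
      rw [PySem.Dict.getD_insert, if_neg hk]
    · intro x
      show x ∈ gA.getD node ([] : List Int) ↔ x ∈ (gB.insert node kept).getD node ([] : List Int)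
      rw [PySem.Dict.getD_insert, if_pos rfl, hnodeA]
      simpa using hmem x
  | cons v rest' ih =>
    intro p kept gA gB removed hkeys hWk hWc hoff hnodeA hmem
    have hnodeKeyA : node ∈ gA.keys := hWk node hkW
    have hcA : PySem.Dict.contains gA node = true :=
      (PySem.Dict.contains_iff_mem_keys gA node).mpr hnodeKeyA
    have hcB : PySem.Dict.contains gB node = true :=
      (PySem.Dict.contains_iff_mem_keys gB node).mpr (hkeys ▸ hnodeKeyA)
    -- unfold one step of A
    have hlen : p.length < (gA.getD node ([] : List Int)).length := by
      rw [hnodeA]; simp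
    have hnb : (gA.getD node ([] : List Int)).getD p.length 0 = v := by
      rw [hnodeA]; exact getD_append_cons p rest' v
    have hvmem : v ∈ gA.getD node ([] : List Int) := by rw [hnodeA]; simp
    have hremove : (PySem.List.remove? (gA.getD node ([] : List Int)) v).getD [] =
        ((p ++ [v]).erase v) ++ rest' := by
      rw [PySem.List.remove?_eq_some_erase _ _ hvmem]
      simp only [Option.getD_some]
      rw [hnodeA, erase_split]
    -- the two tested graphs and their relation
    set eA : List Int := ((p ++ [v]).erase v) ++ rest' with heA
    set gA' := gA.insert node eA with hgA'
    set gB' := gB.insert node (kept ++ rest') with hgB'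
    have hkeysA' : gA'.keys = gA.keys := PySem.Dict.keys_insert_of_contains gA eA hcA
    have hkeysB' : gB'.keys = gB.keys := PySem.Dict.keys_insert_of_contains gB (kept ++ rest') hcB
    have hgetA' : gA'.getD node ([] : List Int) = eA := by
      rw [hgA', PySem.Dict.getD_insert, if_pos rfl]
    have hgetB' : gB'.getD node ([] : List Int) = kept ++ rest' := by
      rw [hgB', PySem.Dict.getD_insert, if_pos rfl]
    have hgetA'off : ∀ k : Int, k ≠ node → gA'.getD k ([] : List Int) = gA.getD k [] := by
      intro k hk; rw [hgA', PySem.Dict.getD_insert, if_neg hk]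
    have hgetB'off : ∀ k : Int, k ≠ node → gB'.getD k ([] : List Int) = gB.getD k [] := by
      intro k hk; rw [hgB', PySem.Dict.getD_insert, if_neg hk]
    have heAsub : ∀ x : Int, x ∈ eA → x ∈ gA.getD node ([] : List Int) := by
      intro x hx
      rw [hnodeA]
      rcases List.mem_append.mp hx with h | h
      · exact List.mem_append.mpr (Or.inl ((mem_erase_snoc p v x).mp h))
      · simp [h]
    have hsubA' : ∀ u w, RelG gA' u w → RelG gA u w := relG_insert_sub gA node eA heAsub
    have hWkA' : ∀ w ∈ W, w ∈ gA'.keys := by intro w hw; rw [hkeysA']; exact hWk w hw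
    have hWcA' : ∀ u ∈ W, ∀ w, RelG gA' u w → w ∈ W :=
      fun u hu w hw => hWc u hu w (hsubA' u w hw)
    have hrel : ∀ u w, RelG gA' u w ↔ RelG gB' u w := by
      intro u w
      unfold RelG
      by_cases hu : u = node
      · subst hu
        rw [hgetA', hgetB', heA]
        simp only [List.mem_append, mem_erase_snoc]
        constructor
        · rintro (h | h)
          · exact Or.inl ((hmem w).mp h)
          · exact Or.inr h
        · rintro (h | h)
          · exact Or.inl ((hmem w).mpr h)
          · exact Or.inr h
      · rw [hgetA'off u hu, hgetB'off u hu]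
        exact hoff u hu w
    have htest : PySem.Set.contains (dfsA gA' (gA'.size + 1) node PySem.Set.empty) v
        = reachableB gB' node v :=
      test_eq gA' gB' W (by rw [hkeysA', hkeysB', hkeys]) hWkA' hWcA' hrel node v hkW
    -- unfold one step of both programs
    have hstepA : edgeLoopA (v :: rest').length node gA p.length removed =
        (if PySem.Set.contains (dfsA gA' (gA'.size + 1) node PySem.Set.empty) v then
          edgeLoopA rest'.length node gA' p.length (removed + 1)
        else
          edgeLoopA rest'.length node (gA'.insert node (PySem.List.insert eA (p.length : Int) v))
            (p.length + 1) removed) := by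
      simp only [List.length_cons, edgeLoopA]
      rw [if_pos hlen, hnb, hremove]
    have hstepB : edgeFoldB node (v :: rest') kept gB removed =
        (if reachableB gB' node v then edgeFoldB node rest' kept gB' (removed + 1)
         else edgeFoldB node rest' (kept ++ [v]) gB' removed) := rfl
    rw [hstepA, hstepB, htest]
    by_cases ht : reachableB gB' node v = true
    · rw [if_pos ht, if_pos ht]
      have ihres := ih ((p ++ [v]).erase v) kept gA' gB' (removed + 1)
        (by rw [hkeysA', hkeysB', hkeys]) hWkA' hWcA'
        (fun k hk x => by rw [hgetA'off k hk, hgetB'off k hk]; exact hoff k hk x)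
        (by rw [hgetA', heA])
        (fun x => (mem_erase_snoc p v x).trans (hmem x))
      rw [length_erase_snoc] at ihres
      obtain ⟨i1, i2, i3, i4, i5, i6⟩ := ihres
      refine ⟨i1, by rw [i2, hkeysA'], by rw [i3, hkeysB'], ?_, i5, ?_⟩
      · intro k hk
        obtain ⟨j1, j2⟩ := i4 k hk
        exact ⟨by rw [j1, hgetA'off k hk], by rw [j2, hgetB'off k hk]⟩
      · intro x hx
        exact heAsub x (hgetA' ▸ i6 x hx)
    · rw [if_neg ht, if_neg ht]
      -- A reinserts v at position p.length
      have hlenE : p.length ≤ eA.length := by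
        rw [heA, List.length_append, length_erase_snoc]
        omega
      have hins : PySem.List.insert eA (p.length : Int) v = ((p ++ [v]).erase v) ++ v :: rest' := by
        rw [PySem.List.insert_natCast eA p.length v hlenE, heA]
        have ht1 : (((p ++ [v]).erase v) ++ rest').take p.length = (p ++ [v]).erase v := by
          conv_lhs => rw [← length_erase_snoc p v]
          simp
        have ht2 : (((p ++ [v]).erase v) ++ rest').drop p.length = rest' := by
          conv_lhs => rw [← length_erase_snoc p v]
          simp
        rw [ht1, ht2]
      have hgA'' : gA'.insert node (PySem.List.insert eA (p.length : Int) v)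
          = gA.insert node (((p ++ [v]).erase v) ++ v :: rest') := by
        rw [hgA', PySem.Dict.insert_insert_self, hins]
      rw [hgA'']
      set eA2 : List Int := ((p ++ [v]).erase v) ++ v :: rest' with heA2
      set gA2 := gA.insert node eA2 with hgA2
      have hcA2 : PySem.Dict.contains gA node = true := hcA
      have hkeysA2 : gA2.keys = gA.keys := PySem.Dict.keys_insert_of_contains gA eA2 hcA2
      have hgetA2 : gA2.getD node ([] : List Int) = eA2 := by
        rw [hgA2, PySem.Dict.getD_insert, if_pos rfl]
      have hgetA2off : ∀ k : Int, k ≠ node → gA2.getD k ([] : List Int) = gA.getD k [] := by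
        intro k hk; rw [hgA2, PySem.Dict.getD_insert, if_neg hk]
      have heA2sub : ∀ x : Int, x ∈ eA2 → x ∈ gA.getD node ([] : List Int) := by
        intro x hx
        rw [hnodeA]
        rcases List.mem_append.mp hx with h | h
        · exact List.mem_append.mpr (Or.inl ((mem_erase_snoc p v x).mp h))
        · exact List.mem_append.mpr (Or.inr h)
      have hsubA2 : ∀ u w, RelG gA2 u w → RelG gA u w := relG_insert_sub gA node eA2 heA2sub
      have hplen : p.length + 1 = (((p ++ [v]).erase v) ++ [v]).length := by
        rw [List.length_append, length_erase_snoc]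
        simp
      rw [hplen]
      have ihres := ih (((p ++ [v]).erase v) ++ [v]) (kept ++ [v]) gA2 gB' removed
        (by rw [hkeysA2, hkeysB', hkeys])
        (by intro w hw; rw [hkeysA2]; exact hWk w hw)
        (fun u hu w hw => hWc u hu w (hsubA2 u w hw))
        (fun k hk x => by rw [hgetA2off k hk, hgetB'off k hk]; exact hoff k hk x)
        (by rw [hgetA2, heA2]; simp)
        (by
          intro x
          simp only [List.mem_append, mem_erase_snoc]
          constructor
          · rintro (h | h)
            · exact Or.inl ((hmem x).mp h)
            · exact Or.inr h
          · rintro (h | h)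
            · exact Or.inl ((hmem x).mpr h)
            · exact Or.inr h)
      obtain ⟨i1, i2, i3, i4, i5, i6⟩ := ihres
      refine ⟨i1, by rw [i2, hkeysA2], by rw [i3, hkeysB'], ?_, i5, ?_⟩
      · intro k hk
        obtain ⟨j1, j2⟩ := i4 k hk
        exact ⟨by rw [j1, hgetA2off k hk], by rw [j2, hgetB'off k hk]⟩
      · intro x hx
        exact heA2sub x (hgetA2 ▸ i6 x hx)

-- ===== VERDICT (by name: the statement is the Claim_ definition above) =====
theorem count_teleport_pipes_spec : Claim_equal_count_teleport_pipes := by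
  intro n m graph _hdom hpre
  obtain ⟨_hnd, hnlen, hWkeys⟩ := hpre
  unfold Spec_count_teleport_pipes
  simp only [count_teleport_pipes, count_teleport_pipes_alt]
  have hkeys0 : (PySem.Dict.mk graph).keys = graph.map Prod.fst := by
    simp [PySem.Dict.keys]
  have hWc0 : ∀ u ∈ reachAll n graph, ∀ v, v ∈ (PySem.Dict.mk graph).getD u ([] : List Int) →
      v ∈ reachAll n graph :=
    satIter_closed graph (startSet n graph) (PySem.Set.nodup_ofList _) hWkeys
  have hrangeW : ∀ k ∈ PySem.List.pyRange 1 (n+1) 1, k ∈ reachAll n graph := by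
    intro k hk
    refine satIter_mono graph 0 (graph.length + 1) (startSet n graph) k (by omega) ?_
    show k ∈ startSet n graph
    unfold startSet
    rw [PySem.Set.mem_ofList]
    have hm : min (n+1) ((graph.length : Int)+1) = n+1 := by omega
    rw [hm]
    exact hk
  have hfold : ∀ (l : List Int), l.Nodup → (∀ k ∈ l, k ∈ reachAll n graph) →
      ∀ (gA gB : PySem.Dict Int (List Int)) (removed : Int),
      gA.keys = gB.keys →
      (∀ w ∈ reachAll n graph, w ∈ gA.keys) →
      (∀ u ∈ reachAll n graph, ∀ v, RelG gA u v → v ∈ reachAll n graph) →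
      (∀ (k x : Int), x ∈ gA.getD k ([] : List Int) ↔ x ∈ gB.getD k ([] : List Int)) →
      (∀ k ∈ l, gA.getD k ([] : List Int) = gB.getD k ([] : List Int)) →
      (l.foldl (fun st node => edgeLoopA ((st.1.getD node []).length) node st.1 0 st.2) (gA, removed)).2 =
      (l.foldl (fun st node => edgeFoldB node (st.1.getD node []) [] st.1 st.2) (gB, removed)).2 := by
    intro l
    induction l with
    | nil => intro _ _ gA gB removed _ _ _ _ _; rfl
    | cons nd ks ihl =>
      intro hnd hmemall gA gB removed hkeys hWk hWc hiff heq
      simp only [List.foldl_cons]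
      have hndW : nd ∈ reachAll n graph := hmemall nd (by simp)
      have hrestB : gB.getD nd ([] : List Int) = gA.getD nd ([] : List Int) :=
        (heq nd (by simp)).symm
      have hcorr := loop_corr nd (reachAll n graph) hndW (gA.getD nd ([] : List Int)) [] [] gA gB removed
        hkeys hWk hWc (fun k hk x => hiff k x) (by simp) (by simp)
      rw [hrestB]
      obtain ⟨c1, c2, c3, c4, c5, c6⟩ := hcorr
      set rA := edgeLoopA ((gA.getD nd ([] : List Int)).length) nd gA 0 removed with hrA
      set rB := edgeFoldB nd (gA.getD nd ([] : List Int)) [] gB removed with hrB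
      have hA0 : edgeLoopA ((gA.getD nd ([] : List Int)).length) nd gA ([] : List Int).length removed = rA := rfl
      rw [hA0] at c1 c2 c4 c5 c6
      have hsubA : ∀ u w, RelG rA.1 u w → RelG gA u w := by
        intro u w hw
        unfold RelG at hw ⊢
        by_cases hu : u = nd
        · subst hu; exact c6 w hw
        · rw [(c4 u hu).1] at hw; exact hw
      refine ihl (List.nodup_cons.mp hnd).2 (fun k hk => hmemall k (by simp [hk])) rA.1 rB.1 rA.2
        (by rw [c2, c3, hkeys]) (fun w hw => by rw [c2]; exact hWk w hw)
        (fun u hu w hw => hWc u hu w (hsubA u w hw)) ?_ ?_ |>.trans ?_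
      · intro k x
        by_cases hk : k = nd
        · subst hk; exact c5 x
        · rw [(c4 k hk).1, (c4 k hk).2]; exact hiff k x
      · intro k hk
        have hknd : k ≠ nd := fun h => (List.nodup_cons.mp hnd).1 (h ▸ hk)
        rw [(c4 k hknd).1, (c4 k hknd).2]
        exact heq k (by simp [hk])
      · rw [c1]
  have hres := hfold (PySem.List.pyRange 1 (n+1) 1) (PySem.List.nodup_pyRange_one 1 (n+1))
    hrangeW (PySem.Dict.mk graph) (PySem.Dict.mk graph) 0 rfl
    (fun w hw => by rw [hkeys0]; exact hWkeys w hw) hWc0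
    (fun k x => Iff.rfl) (fun k _ => rfl)
  rw [hres]
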